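-- pv_equiv track=rewrite | github.com/TitanicThompson1/FPRO | Práticas/rm_letter_rev.py | rm_letter_rev
-- ===== SOURCE A (Python) =====
-- def rm_letter_rev(l, astr):
--
--     result=""
--     i=0
--     for x in astr:
--         if x not in l:
--             result=result+x
--
--     final_result=""
--     for x in result:
--
--         final_result=final_result+result[len(result)-1-i]
--         i+=1
--     return final_result
-- ===== SOURCE B (Python) =====
-- def rm_letter_rev(l, astr):
--     result = ""
--     for x in astr:
--         if x not in l:
--             result = x + result
--     return result
-- ===== Notes on version B (the rewrite author's own statement) =====
-- stated objective: simpler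
-- what changed: Replaces A's two sequential loops (filter pass, then a backward-index reverse pass) with one fused loop that prepends each kept character, building the reversed filtered string directly.
import Mathlib
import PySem

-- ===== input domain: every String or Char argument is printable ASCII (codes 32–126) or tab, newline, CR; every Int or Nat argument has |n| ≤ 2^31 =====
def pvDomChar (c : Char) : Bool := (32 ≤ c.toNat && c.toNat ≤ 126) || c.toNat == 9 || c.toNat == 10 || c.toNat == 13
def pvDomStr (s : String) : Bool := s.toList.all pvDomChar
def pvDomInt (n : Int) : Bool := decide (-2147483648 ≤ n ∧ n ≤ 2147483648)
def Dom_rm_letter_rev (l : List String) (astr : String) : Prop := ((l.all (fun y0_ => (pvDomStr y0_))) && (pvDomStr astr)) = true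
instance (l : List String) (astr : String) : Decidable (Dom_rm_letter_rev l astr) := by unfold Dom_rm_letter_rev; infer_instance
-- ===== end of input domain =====

-- ===== PORT A =====
-- B fuses A's filter pass and backward-index reverse pass into one prepending pass (objective: simpler).
def rm_letter_rev (l : List String) (astr : String) : String :=
  let result : List Char :=
    astr.toList.foldl (fun r x => if !l.contains (String.mk [x]) then r ++ [x] else r) []
  -- second loop: i starts at 0; result[len(result)-1-i] is always in range, so getD is exact here
  let st := result.foldl
    (fun (st : List Char × Nat) _ =>
      (st.1 ++ [result.getD (result.length - 1 - st.2) ' '], st.2 + 1)) ([], 0)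
  String.mk st.1

-- ===== PORT B =====
def rm_letter_rev_alt (l : List String) (astr : String) : String :=
  String.mk (astr.toList.foldl (fun r x => if !l.contains (String.mk [x]) then x :: r else r) [])

-- ===== PRECONDITION & SPEC =====
def Spec_rm_letter_rev (l : List String) (astr : String) (out : String) : Prop := out = rm_letter_rev_alt l astr
instance (l : List String) (astr : String) (out : String) : Decidable (Spec_rm_letter_rev l astr out) := by unfold Spec_rm_letter_rev; infer_instance

-- ===== CLAIM (what is proved, stated in full; the proofs are below) =====
def Claim_equal_rm_letter_rev : Prop := ∀ (l : List String) (astr : String), Dom_rm_letter_rev l astr → Spec_rm_letter_rev l astr (rm_letter_rev l astr)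

-- ===== LEMMAS AND PROOFS =====

-- B's loop: prepending the kept characters yields the reversed filtered list.
theorem foldl_cons_if {α : Type} (p : α → Bool) (xs : List α) (acc : List α) :
    xs.foldl (fun r x => if p x then x :: r else r) acc = (xs.filter p).reverse ++ acc := by
  induction xs generalizing acc with
  | nil => simp
  | cons y ys ih =>
    simp only [List.foldl_cons, List.filter_cons]
    by_cases h : p y = true <;> simp [h, ih]

-- A's second loop, generalized: the state walks the indices len-1-i, len-1-(i+1), …
theorem foldl_backidx {β : Type} (res : List Char) (ys : List β) (acc : List Char) (i : Nat) :
    (ys.foldl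
      (fun (st : List Char × Nat) _ =>
        (st.1 ++ [res.getD (res.length - 1 - st.2) ' '], st.2 + 1)) (acc, i)).1
      = acc ++ (List.range ys.length).map (fun j => res.getD (res.length - 1 - (i + j)) ' ') := by
  induction ys generalizing acc i with
  | nil => simp
  | cons y ys ih =>
    rw [List.foldl_cons, ih]
    simp only [List.length_cons, List.range_succ_eq_map, List.map_cons, List.map_map,
      Nat.add_zero, List.append_assoc, List.singleton_append]
    congr 2
    apply List.map_congr_left
    intro j hj
    simp only [Function.comp_apply]
    rw [show res.length - 1 - (i + 1 + j) = res.length - 1 - (i + (j + 1)) from by omega]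

theorem map_backidx_eq_reverse (res : List Char) :
    (List.range res.length).map (fun j => res.getD (res.length - 1 - j) ' ') = res.reverse := by
  apply List.ext_getElem
  · simp
  · intro k hk hk'
    simp only [List.getElem_map, List.getElem_range, List.getElem_reverse]
    have hb : res.length - 1 - k < res.length := by simp at hk; omega
    rw [List.getD_eq_getElem res ' ' hb]

-- ===== VERDICT (by name: the statement is the Claim_ definition above) =====
theorem rm_letter_rev_spec : Claim_equal_rm_letter_rev := by
  intro l astr _
  unfold Spec_rm_letter_rev rm_letter_rev rm_letter_rev_alt
  simp only [PySem.List.foldl_append_if_eq_filter, foldl_backidx, foldl_cons_if,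
    List.nil_append, List.append_nil, Nat.zero_add, map_backidx_eq_reverse]
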